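-- pv_equiv track=rewrite | github.com/alejandroklever/GrammarAnalyzer | regex/utils.py | clean_regex
-- ===== SOURCE A (Python) =====
-- def clean_regex(regex):
--     stack = []
--     invalid = [False] * len(regex)
--     for i, c in enumerate(regex):
--         if c == '(':
--             stack.append(i)
--         if c == ')':
--             j = stack.pop()
--             invalid[i] = invalid[j] = (i - j in [1, 2]) or (i - j == 3 and regex[i - 1] == '*')
--
--     s = ''
--     for i, c in enumerate(regex):
--         if not invalid[i]:
--             s += c
--     return s
-- ===== SOURCE B (Python) =====
-- def clean_regex(regex):
--     # one pass with a stack of (open_index, text_before_group) instead of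
--     # A's invalid-marks array + second filtering pass
--     stack = []
--     cur = ''
--     for i, c in enumerate(regex):
--         if c == '(':
--             stack.append((i, cur))
--             cur = ''
--         elif c == ')':
--             j, parent = stack.pop()
--             d = i - j
--             if d == 1 or d == 2 or (d == 3 and regex[i - 1] == '*'):
--                 cur = parent + cur
--             else:
--                 cur = parent + '(' + cur + ')'
--         else:
--             cur += c
--     while stack:
--         j, parent = stack.pop()
--         cur = parent + '(' + cur
--     return cur
-- ===== Notes on version B (the rewrite author's own statement) =====
-- stated objective: alternative
-- what changed: Replaces A's two-pass scheme (mark invalid parenthesis indices in a boolean array via an index stack, then filter the string) by a single pass that builds the output directly with a stack of (open_index, text_before_group) segments, dropping or re-wrapping each group as its ')' is reached; unmatched '(' are re-attached at the end.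
-- outside the precondition, e.g. on clean_regex(')('): A raises IndexError, B raises IndexError
import Mathlib
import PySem

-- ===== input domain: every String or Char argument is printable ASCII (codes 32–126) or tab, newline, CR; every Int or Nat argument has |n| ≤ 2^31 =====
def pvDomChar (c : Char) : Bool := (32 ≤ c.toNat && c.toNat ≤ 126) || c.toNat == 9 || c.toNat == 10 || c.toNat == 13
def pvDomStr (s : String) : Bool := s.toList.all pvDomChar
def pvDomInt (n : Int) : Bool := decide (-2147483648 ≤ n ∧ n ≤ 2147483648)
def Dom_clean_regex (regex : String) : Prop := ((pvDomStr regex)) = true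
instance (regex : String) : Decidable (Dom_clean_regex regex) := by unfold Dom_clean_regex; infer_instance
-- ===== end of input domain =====

-- B rebuilds the cleaned string in ONE pass with a stack of (open_index, pending-text) segments,
-- instead of A's invalid-marks array plus second filtering pass; same return value on Pre_.

-- ===== PORT A =====
-- one iteration of A's first loop: push '(' indices, on ')' pop and mark both ends invalid iff trivial
def cleanStepA (cs : List Char) (st : List Int × List Bool) (ic : Int × Char) : List Int × List Bool :=
  let stack := if ic.2 = '(' then ic.1 :: st.1 else st.1
  if ic.2 = ')' then
    match stack with
    | [] => ([], st.2)  -- Python raises IndexError here (stack.pop on empty); excluded by Pre_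
    | j :: rest =>
      let b := decide ((ic.1 - j = 1 ∨ ic.1 - j = 2) ∨ (ic.1 - j = 3 ∧ PySem.List.pyGetD cs (ic.1 - 1) ' ' = '*'))
      (rest, PySem.List.pySetD (PySem.List.pySetD st.2 ic.1 b) j b)
  else (stack, st.2)

def clean_regex (regex : String) : String :=
  let cs := regex.toList
  let res := (PySem.List.enumerate cs 0).foldl (cleanStepA cs) ([], List.replicate cs.length false)
  String.mk ((PySem.List.enumerate cs 0).foldl
    (fun s (ic : Int × Char) => if PySem.List.pyGetD res.2 ic.1 false then s else s ++ [ic.2]) [])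

-- ===== PORT B =====
-- one iteration of B's loop: '(' pushes (index, text so far); ')' pops and drops or re-wraps the group
def cleanStepB (cs : List Char) (st : List (Int × List Char) × List Char) (ic : Int × Char) :
    List (Int × List Char) × List Char :=
  if ic.2 = '(' then ((ic.1, st.2) :: st.1, [])
  else if ic.2 = ')' then
    match st.1 with
    | [] => ([], st.2)  -- Python raises IndexError here (stack.pop on empty); excluded by Pre_
    | (j, parent) :: rest =>
      if ic.1 - j = 1 ∨ ic.1 - j = 2 ∨ (ic.1 - j = 3 ∧ PySem.List.pyGetD cs (ic.1 - 1) ' ' = '*')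
      then (rest, parent ++ st.2)
      else (rest, parent ++ '(' :: (st.2 ++ [')']))
  else (st.1, st.2 ++ [ic.2])

def clean_regex_alt (regex : String) : String :=
  let cs := regex.toList
  let res := (PySem.List.enumerate cs 0).foldl (cleanStepB cs) ([], [])
  String.mk (res.1.foldl (fun acc jp => jp.2 ++ '(' :: acc) res.2)

-- ===== PRECONDITION & SPEC =====
-- Pre_ excludes exactly the strings with a prefix containing more ')' than '(' :
-- there BOTH Pythons raise IndexError (stack.pop from an empty list).
def Pre_clean_regex (regex : String) : Prop :=
  ∀ k ∈ List.range (regex.toList.length + 1),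
    ((regex.toList.take k).count ')') ≤ ((regex.toList.take k).count '(')
instance (regex : String) : Decidable (Pre_clean_regex regex) := by unfold Pre_clean_regex; infer_instance

def pvWitness_clean_regex : String := "(a|b)*(c)"

def Spec_clean_regex (regex : String) (out : String) : Prop := out = clean_regex_alt regex
instance (regex : String) (out : String) : Decidable (Spec_clean_regex regex out) := by
  unfold Spec_clean_regex; infer_instance

-- ===== CLAIM (what is proved, stated in full; the proofs are below) =====
def Claim_equal_clean_regex : Prop :=
  ∀ (regex : String), Dom_clean_regex regex → Pre_clean_regex regex →
    Spec_clean_regex regex (clean_regex regex)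

-- ===== LEMMAS AND PROOFS =====

-- chars of cs at indices in [a,b) whose invalid flag is false
def rfil (cs : List Char) (inv : List Bool) (a b : Nat) : List Char :=
  ((List.range' a (b - a)).filter (fun i => !(inv.getD i false))).map (fun i => cs.getD i ' ')

-- lower end of the region the current segment covers
def loIdx : List (Nat × List Char) → Nat
  | [] => 0
  | jp :: _ => jp.1 + 1

-- each stacked segment is the filtered text strictly between its opener and the next inner opener
def SegsOK (cs : List Char) (inv : List Bool) : List (Nat × List Char) → Prop
  | [] => True
  | jp :: rest => jp.2 = rfil cs inv (loIdx rest) jp.1 ∧ SegsOK cs inv rest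

-- the bisimulation invariant between A's state (stA) and B's state (stB) after processing cs[0:k]
def StInv (cs : List Char) (k : Nat) (stA : List Int × List Bool)
    (stB : List (Int × List Char) × List Char) : Prop :=
  ∃ sn : List (Nat × List Char),
    stA.1 = sn.map (fun jp => ((jp.1 : Nat) : Int)) ∧
    stB.1 = sn.map (fun jp => (((jp.1 : Nat) : Int), jp.2)) ∧
    stA.2.length = cs.length ∧
    List.Pairwise (fun a b => b.1 < a.1) sn ∧
    (∀ jp ∈ sn, jp.1 < k) ∧
    (∀ x : Nat, (x ∈ sn.map Prod.fst ∨ k ≤ x) → stA.2.getD x false = false) ∧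
    (∀ jp ∈ sn, cs.getD jp.1 ' ' = '(') ∧
    sn.length + (cs.take k).count ')' = (cs.take k).count '(' ∧
    SegsOK cs stA.2 sn ∧
    stB.2 = rfil cs stA.2 (loIdx sn) k

theorem rfil_nil (cs : List Char) (inv : List Bool) (a b : Nat) (h : b ≤ a) :
    rfil cs inv a b = [] := by
  unfold rfil
  have : b - a = 0 := by omega
  simp [this]

theorem rfil_snoc (cs : List Char) (inv : List Bool) (a b : Nat) (h : a ≤ b) :
    rfil cs inv a (b + 1) =
      rfil cs inv a b ++ (if inv.getD b false then [] else [cs.getD b ' ']) := by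
  unfold rfil
  have h1 : b + 1 - a = (b - a) + 1 := by omega
  rw [h1, List.range'_concat]
  have h2 : a + 1 * (b - a) = b := by omega
  rw [h2, List.filter_append, List.map_append]
  cases hb : inv.getD b false <;> simp only [List.getD_eq_getElem?_getD] at hb <;>
    simp [List.getD_eq_getElem?_getD, hb]

theorem rfil_split (cs : List Char) (inv : List Bool) (a b c : Nat) (h1 : a ≤ b) (h2 : b ≤ c) :
    rfil cs inv a c = rfil cs inv a b ++ rfil cs inv b c := by
  unfold rfil
  have : List.range' a (c - a) = List.range' a (b - a) ++ List.range' b (c - b) := by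
    have hb : a + 1 * (b - a) = b := by omega
    have hn : (b - a) + (c - b) = c - a := by omega
    rw [← hn, ← List.range'_append, hb]
  rw [this, List.filter_append, List.map_append]

theorem rfil_set_out (cs : List Char) (inv : List Bool) (a b x : Nat) (v : Bool)
    (h : x < a ∨ b ≤ x) : rfil cs (inv.set x v) a b = rfil cs inv a b := by
  unfold rfil
  congr 1
  apply List.filter_congr
  intro i hi
  rw [List.mem_range'_1] at hi
  have hne : x ≠ i := by omega
  simp [List.getD, List.getElem?_set_ne hne]

theorem rfil_one (cs : List Char) (inv : List Bool) (a : Nat) :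
    rfil cs inv a (a + 1) = (if inv.getD a false then [] else [cs.getD a ' ']) := by
  rw [rfil_snoc cs inv a a (le_refl a), rfil_nil cs inv a a (le_refl a), List.nil_append]

theorem getD_set_ne (l : List Bool) (i x : Nat) (v : Bool) (h : x ≠ i) :
    (l.set i v).getD x false = l.getD x false := by
  simp [List.getD, List.getElem?_set_ne (Ne.symm h)]

theorem getD_set_self (l : List Bool) (i : Nat) (v : Bool) (h : i < l.length) :
    (l.set i v).getD i false = v := by
  simp [List.getD, List.getElem?_set_self h]

theorem SegsOK_set_out (cs : List Char) (inv : List Bool) (x : Nat) (v : Bool) :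
    ∀ sn : List (Nat × List Char), SegsOK cs inv sn → (∀ jp ∈ sn, jp.1 ≤ x) →
      SegsOK cs (inv.set x v) sn := by
  intro sn
  induction sn with
  | nil => intro _ _; trivial
  | cons jp rest ih =>
    intro hseg hbd
    refine ⟨?_, ih hseg.2 (fun q hq => hbd q (List.mem_cons_of_mem _ hq))⟩
    rw [rfil_set_out cs inv (loIdx rest) jp.1 x v (Or.inr (hbd jp (List.mem_cons_self)))]
    exact hseg.1

theorem unwind (cs : List Char) (inv : List Bool) (k : Nat) :
    ∀ sn : List (Nat × List Char), SegsOK cs inv sn →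
      List.Pairwise (fun a b => b.1 < a.1) sn →
      (∀ jp ∈ sn, jp.1 < k ∧ inv.getD jp.1 false = false ∧ cs.getD jp.1 ' ' = '(') →
      sn.foldl (fun acc jp => jp.2 ++ '(' :: acc) (rfil cs inv (loIdx sn) k) = rfil cs inv 0 k := by
  intro sn
  induction sn with
  | nil => intro _ _ _; simp [loIdx]
  | cons jp rest ih =>
    intro hseg hpw hall
    have hj := hall jp (List.mem_cons_self)
    have hlo : loIdx rest ≤ jp.1 := by
      cases rest with
      | nil => simp [loIdx]
      | cons q t =>
        have := (List.pairwise_cons.mp hpw).1 q (List.mem_cons_self)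
        simp [loIdx]; omega
    have hkey : jp.2 ++ '(' :: rfil cs inv (loIdx (jp :: rest)) k = rfil cs inv (loIdx rest) k := by
      rw [rfil_split cs inv (loIdx rest) jp.1 k hlo (by omega),
          rfil_split cs inv jp.1 (jp.1 + 1) k (by omega) (by omega),
          rfil_one, hj.2.1, hj.2.2]
      simp [loIdx, hseg.1]
    rw [List.foldl_cons, hkey]
    exact ih hseg.2 (List.pairwise_cons.mp hpw).2 (fun q hq => hall q (List.mem_cons_of_mem _ hq))

theorem getD_of_drop (cs : List Char) (k : Nat) (c : Char) (t : List Char)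
    (h : cs.drop k = c :: t) : cs.getD k ' ' = c := by
  have h0 : (cs.drop k)[0]? = some c := by rw [h]; rfl
  rw [List.getElem?_drop] at h0
  simp only [Nat.add_zero] at h0
  simp [List.getD_eq_getElem?_getD, h0]

theorem length_lt_of_drop (cs : List Char) (k : Nat) (c : Char) (t : List Char)
    (h : cs.drop k = c :: t) : k < cs.length := by
  by_contra hk
  rw [List.drop_eq_nil_of_le (by omega)] at h
  simp at h

theorem take_succ_of_drop (cs : List Char) (k : Nat) (c : Char) (t : List Char)
    (h : cs.drop k = c :: t) : cs.take (k + 1) = cs.take k ++ [c] := by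
  have h0 : cs[k]? = some c := by
    have h0 : (cs.drop k)[0]? = some c := by rw [h]; rfl
    rw [List.getElem?_drop] at h0; simpa using h0
  rw [List.take_add_one, h0]
  rfl

-- A's second loop (the filter pass) computes rfil over the final invalid array
theorem outA (cs : List Char) (inv : List Bool) :
    ∀ (t : List Char) (k : Nat) (s : List Char), cs.drop k = t →
      (PySem.List.enumerate t (k : Int)).foldl
        (fun s (ic : Int × Char) => if PySem.List.pyGetD inv ic.1 false then s else s ++ [ic.2]) s
      = s ++ rfil cs inv k cs.length := by
  intro t
  induction t with
  | nil =>
    intro k s hdrop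
    have : cs.length ≤ k := by
      by_contra hk
      have := List.drop_eq_nil_iff.mp hdrop
      omega
    rw [rfil_nil cs inv k cs.length this]
    simp [PySem.List.enumerate_nil]
  | cons c t ih =>
    intro k s hdrop
    have hk : k < cs.length := length_lt_of_drop cs k c t hdrop
    have hc : cs.getD k ' ' = c := getD_of_drop cs k c t hdrop
    have hdrop' : cs.drop (k + 1) = t := by
      have := List.drop_drop (l := cs) (i := 1) (j := k)
      rw [← this, hdrop]; rfl
    rw [PySem.List.enumerate_cons, List.foldl_cons]
    have hcast : (k : Int) + 1 = ((k + 1 : Nat) : Int) := by push_cast; ring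
    rw [hcast, ih (k + 1) _ hdrop']
    rw [rfil_split cs inv k (k + 1) cs.length (by omega) (by omega), rfil_one, hc]
    simp only [PySem.List.pyGetD_natCast]
    cases inv.getD k false <;> simp

-- one step of both loops preserves the invariant (under Pre_'s prefix-count condition)
set_option maxHeartbeats 2000000 in
theorem step_preserve (cs : List Char)
    (hPre : ∀ k, k ≤ cs.length → ((cs.take k).count ')') ≤ ((cs.take k).count '('))
    (k : Nat) (c : Char) (t : List Char) (hdrop : cs.drop k = c :: t)
    (stA : List Int × List Bool) (stB : List (Int × List Char) × List Char)
    (hinv : StInv cs k stA stB) :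
    StInv cs (k + 1) (cleanStepA cs stA ((k : Int), c)) (cleanStepB cs stB ((k : Int), c)) := by
  obtain ⟨sa, inv⟩ := stA
  obtain ⟨sb, cur⟩ := stB
  obtain ⟨sn, hA1, hB1, hlen, hpw, hbd, hfalse, hpar, hcnt, hseg, hcur⟩ := hinv
  simp only at hA1 hB1 hlen hfalse hseg hcur
  have hkl : k < cs.length := length_lt_of_drop cs k c t hdrop
  have hc : cs.getD k ' ' = c := getD_of_drop cs k c t hdrop
  have htake : cs.take (k + 1) = cs.take k ++ [c] := take_succ_of_drop cs k c t hdrop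
  by_cases hco : c = '('
  · -- opening parenthesis: push
    subst hco
    simp only [cleanStepA, cleanStepB, if_neg (by decide : ¬('(' : Char) = ')')]
    refine ⟨(k, cur) :: sn, by simp [hA1], by simp [hB1], hlen, ?_, ?_, ?_, ?_, ?_, ?_, ?_⟩
    · exact List.pairwise_cons.mpr ⟨fun jp hjp => hbd jp hjp, hpw⟩
    · intro jp hjp
      rcases List.mem_cons.mp hjp with h | h
      · subst h; omega
      · have := hbd jp h; omega
    · intro x hx
      rcases hx with hx | hx
      · rcases List.mem_map.mp hx with ⟨jp, hjp, hx⟩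
        rcases List.mem_cons.mp hjp with h | h
        · subst h; exact hfalse x (Or.inr (by simp at hx; omega))
        · exact hfalse x (Or.inl (by subst hx; exact List.mem_map_of_mem h))
      · exact hfalse x (Or.inr (by omega))
    · intro jp hjp
      rcases List.mem_cons.mp hjp with h | h
      · subst h; exact hc
      · exact hpar jp h
    · rw [htake]
      simp only [List.count_append]
      have h1 : List.count ')' ['('] = 0 := by decide
      have h2 : List.count '(' ['('] = 1 := by decide
      rw [h1, h2]; simp only [List.length_cons]; omega
    · exact ⟨hcur, hseg⟩
    · exact (rfil_nil cs inv (loIdx ((k, cur) :: sn)) (k + 1) (by simp [loIdx])).symm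
  · by_cases hcc : c = ')'
    · -- closing parenthesis: pop
      subst hcc
      have hPk : List.count ')' (cs.take (k+1)) ≤ List.count '(' (cs.take (k+1)) :=
        hPre (k+1) (by omega)
      rw [htake] at hPk
      simp only [List.count_append] at hPk
      have h1 : List.count ')' [')'] = 1 := by decide
      have h2 : List.count '(' [')'] = 0 := by decide
      rw [h1, h2] at hPk
      cases sn with
      | nil => simp only [List.length_nil] at hcnt; omega
      | cons hd rest =>
        obtain ⟨j1, p1⟩ := hd
        have hj1k : j1 < k := hbd (j1, p1) List.mem_cons_self
        have hrestlt : ∀ jp ∈ rest, jp.1 < j1 := (List.pairwise_cons.mp hpw).1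
        have hlo : loIdx rest ≤ j1 := by
          cases rest with
          | nil => simp [loIdx]
          | cons q tq =>
            have := hrestlt q List.mem_cons_self
            simp [loIdx]; omega
        -- evaluate the two steps
        rw [hA1, hB1]
        simp only [cleanStepA, cleanStepB, if_neg (by decide : ¬(')' : Char) = '('),
          List.map_cons]
        set PA : Prop := (((k : Int) - (j1 : Int) = 1 ∨ (k : Int) - (j1 : Int) = 2) ∨
          ((k : Int) - (j1 : Int) = 3 ∧ PySem.List.pyGetD cs ((k : Int) - 1) ' ' = '*')) with hPAdef
        set inv' := PySem.List.pySetD (PySem.List.pySetD inv (k : Int) (decide PA))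
          ((j1 : Int)) (decide PA) with hinv'def
        have hset : inv' = (inv.set k (decide PA)).set j1 (decide PA) := by
          rw [hinv'def]; simp
        have hlen' : inv'.length = cs.length := by rw [hset]; simp [hlen]
        have hj1len : j1 < inv.length := by omega
        have hgj1 : inv'.getD j1 false = decide PA := by
          rw [hset]; exact getD_set_self _ j1 _ (by simpa using hj1len)
        have hgk : inv'.getD k false = decide PA := by
          rw [hset, getD_set_ne _ j1 k _ (by omega)]
          exact getD_set_self _ k _ (by omega)
        have hseg' : SegsOK cs inv' rest := by
          rw [hset]
          exact SegsOK_set_out cs (inv.set k (decide PA)) j1 (decide PA) rest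
            (SegsOK_set_out cs inv k (decide PA) rest hseg.2
              (fun jp hjp => by have := hrestlt jp hjp; omega))
            (fun jp hjp => by have := hrestlt jp hjp; omega)
        have hfil1 : rfil cs inv' (loIdx rest) j1 = p1 := by
          rw [hset, rfil_set_out _ _ _ _ j1 _ (Or.inr (le_refl j1)),
            rfil_set_out _ _ _ _ k _ (Or.inr (by omega))]
          exact hseg.1.symm
        have hfil2 : rfil cs inv' (j1 + 1) k = cur := by
          rw [hset, rfil_set_out _ _ _ _ j1 _ (Or.inl (by omega)),
            rfil_set_out _ _ _ _ k _ (Or.inr (le_refl k))]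
          rw [hcur]; rfl
        have hrhs : rfil cs inv' (loIdx rest) (k + 1) =
            p1 ++ ((if inv'.getD j1 false then [] else [cs.getD j1 ' ']) ++
              (cur ++ (if inv'.getD k false then [] else [cs.getD k ' ']))) := by
          rw [rfil_split cs inv' (loIdx rest) j1 (k+1) hlo (by omega),
            rfil_split cs inv' j1 (j1+1) (k+1) (by omega) (by omega),
            rfil_split cs inv' (j1+1) k (k+1) (by omega) (by omega),
            rfil_one, rfil_snoc cs inv' k k (le_refl k), rfil_nil cs inv' k k (le_refl k),
            hfil1, hfil2]
          simp
        have hrest : ∀ sn', sn' = rest →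
            StInv cs (k + 1) (List.map (fun jp => ((jp.1 : Nat) : Int)) rest, inv')
              (List.map (fun jp => (((jp.1 : Nat) : Int), jp.2)) rest,
                if (k : Int) - (j1 : Int) = 1 ∨ (k : Int) - (j1 : Int) = 2 ∨
                    ((k : Int) - (j1 : Int) = 3 ∧ PySem.List.pyGetD cs ((k : Int) - 1) ' ' = '*')
                then p1 ++ cur else p1 ++ '(' :: (cur ++ [')'])) := by
          intro sn' hsn'
          refine ⟨rest, rfl, rfl, hlen', (List.pairwise_cons.mp hpw).2, ?_, ?_, ?_, ?_, hseg', ?_⟩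
          · intro jp hjp
            have := hrestlt jp hjp; omega
          · intro x hx
            have hxne : x ≠ k ∧ x ≠ j1 := by
              rcases hx with hx | hx
              · rcases List.mem_map.mp hx with ⟨jp, hjp, hx⟩
                have := hrestlt jp hjp
                subst hx; omega
              · omega
            rw [hset, getD_set_ne _ _ _ _ hxne.2, getD_set_ne _ _ _ _ hxne.1]
            refine hfalse x ?_
            rcases hx with hx | hx
            · rcases List.mem_map.mp hx with ⟨jp, hjp, hx⟩
              exact Or.inl (by subst hx; exact List.mem_map_of_mem (List.mem_cons_of_mem _ hjp))
            · exact Or.inr (by omega)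
          · intro jp hjp
            exact hpar jp (List.mem_cons_of_mem _ hjp)
          · rw [htake]
            simp only [List.count_append, h1, h2]
            simp only [List.length_cons] at hcnt
            omega
          · have hPAiff : ((k : Int) - (j1 : Int) = 1 ∨ (k : Int) - (j1 : Int) = 2 ∨
                ((k : Int) - (j1 : Int) = 3 ∧ PySem.List.pyGetD cs ((k : Int) - 1) ' ' = '*')) ↔ PA := by
              rw [hPAdef]; exact or_assoc.symm
            by_cases hP : PA
            · rw [if_pos (hPAiff.mpr hP), hrhs, hgj1, hgk,
                if_pos (by simp [hP]), if_pos (by simp [hP])]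
              simp
            · rw [if_neg (fun hh => hP (hPAiff.mp hh)), hrhs, hgj1, hgk,
                if_neg (by simp [hP]), if_neg (by simp [hP])]
              rw [hpar (j1, p1) List.mem_cons_self, hc]
              simp
        simp only [if_true]
        have hsplit : (if ((k : Int) - (j1 : Int) = 1 ∨ (k : Int) - (j1 : Int) = 2 ∨
              ((k : Int) - (j1 : Int) = 3 ∧ PySem.List.pyGetD cs ((k : Int) - 1) ' ' = '*'))
            then (List.map (fun jp => (((jp.1 : Nat) : Int), jp.2)) rest, p1 ++ cur)
            else (List.map (fun jp => (((jp.1 : Nat) : Int), jp.2)) rest, p1 ++ '(' :: (cur ++ [')'])))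
            = (List.map (fun jp => (((jp.1 : Nat) : Int), jp.2)) rest,
               if ((k : Int) - (j1 : Int) = 1 ∨ (k : Int) - (j1 : Int) = 2 ∨
                  ((k : Int) - (j1 : Int) = 3 ∧ PySem.List.pyGetD cs ((k : Int) - 1) ' ' = '*'))
               then p1 ++ cur else p1 ++ '(' :: (cur ++ [')'])) := by
          split <;> rfl
        rw [hsplit]
        exact hrest rest rfl
    · -- ordinary character
      simp only [cleanStepA, cleanStepB, if_neg (fun h => hco (by simpa using h)),
        if_neg (fun h => hcc (by simpa using h))]
      refine ⟨sn, hA1, hB1, hlen, hpw, ?_, ?_, hpar, ?_, hseg, ?_⟩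
      · intro jp hjp
        have := hbd jp hjp; omega
      · intro x hx
        refine hfalse x ?_
        rcases hx with hx | hx
        · exact Or.inl hx
        · exact Or.inr (by omega)
      · rw [htake]
        simp only [List.count_append]
        have h1 : List.count ')' [c] = 0 := by
          simp [List.count_singleton]
          intro h; exact hcc h
        have h2 : List.count '(' [c] = 0 := by
          simp [List.count_singleton]
          intro h; exact hco h
        rw [h1, h2]; omega
      · have hlok : loIdx sn ≤ k := by
          cases sn with
          | nil => simp [loIdx]
          | cons q tq =>
            have := hbd q List.mem_cons_self
            simp [loIdx]; omega
        rw [rfil_snoc cs inv (loIdx sn) k hlok, ← hcur,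
          hfalse k (Or.inr (le_refl k)), hc]
        simp

-- the whole loop preserves the invariant
theorem loop_preserve (cs : List Char)
    (hPre : ∀ k, k ≤ cs.length → ((cs.take k).count ')') ≤ ((cs.take k).count '(')) :
    ∀ (t : List Char) (k : Nat), k ≤ cs.length → cs.drop k = t →
      ∀ stA stB, StInv cs k stA stB →
        StInv cs cs.length ((PySem.List.enumerate t (k : Int)).foldl (cleanStepA cs) stA)
          ((PySem.List.enumerate t (k : Int)).foldl (cleanStepB cs) stB) := by
  intro t
  induction t with
  | nil =>
    intro k hk hdrop stA stB h
    have : cs.length ≤ k := by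
      by_contra hlt
      have := List.drop_eq_nil_iff.mp hdrop
      omega
    have hkeq : k = cs.length := by omega
    simpa [PySem.List.enumerate_nil, hkeq] using h
  | cons c t ih =>
    intro k hk hdrop stA stB h
    have hkl : k < cs.length := length_lt_of_drop cs k c t hdrop
    have hdrop' : cs.drop (k + 1) = t := by
      have := List.drop_drop (l := cs) (i := 1) (j := k)
      rw [← this, hdrop]; rfl
    rw [PySem.List.enumerate_cons]
    have hcast : (k : Int) + 1 = ((k + 1 : Nat) : Int) := by push_cast; ring
    rw [hcast, List.foldl_cons, List.foldl_cons]
    exact ih (k + 1) (by omega) hdrop' _ _ (step_preserve cs hPre k c t hdrop stA stB h)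

-- ===== VERDICT (by name: the statement is the Claim_ definition above) =====
theorem clean_regex_spec : Claim_equal_clean_regex := by
  intro regex _ hPre
  unfold Spec_clean_regex
  simp only [clean_regex, clean_regex_alt]
  have hPre' : ∀ k, k ≤ regex.toList.length →
      ((regex.toList.take k).count ')') ≤ ((regex.toList.take k).count '(') := by
    intro k hk
    exact hPre k (List.mem_range.mpr (by omega))
  have hinit : StInv regex.toList 0 ([], List.replicate regex.toList.length false) ([], []) := by
    refine ⟨[], rfl, rfl, by simp, by simp, by simp, ?_, by simp, by simp, trivial, ?_⟩
    · intro x _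
      rw [List.getD_eq_getElem?_getD, List.getElem?_replicate]
      split <;> rfl
    · rw [rfil_nil regex.toList _ (loIdx []) 0 (by simp [loIdx])]
  have hfin := loop_preserve regex.toList hPre' regex.toList 0 (by omega) (by simp) _ _ hinit
  have hzero : ((0 : Nat) : Int) = (0 : Int) := by norm_num
  rw [hzero] at hfin
  obtain ⟨sn, hA1, hB1, hlen, hpw, hbd, hfalse, hpar, hcnt, hseg, hcur⟩ := hfin
  have houtA := outA regex.toList
      (List.foldl (cleanStepA regex.toList) ([], List.replicate regex.toList.length false)
        (PySem.List.enumerate regex.toList)).2 regex.toList 0 [] (by simp)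
  rw [hzero] at houtA
  congr 1
  rw [houtA, List.nil_append, hB1, List.foldl_map, hcur]
  exact (unwind regex.toList _ regex.toList.length sn hseg hpw (fun jp hjp =>
    ⟨hbd jp hjp, hfalse jp.1 (Or.inl (List.mem_map_of_mem hjp)), hpar jp hjp⟩)).symm
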